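-- pv_equiv track=rewrite | github.com/schreiberbrett/graph-theory | src/solve.py | venn_diagram
-- ===== SOURCE A (Python) =====
-- from typing import Deque, FrozenSet, Hashable, Optional, TypeVar, List, Callable, Tuple, Set, Generator, Dict
--
-- A = TypeVar('A', bound=Hashable)
--
-- def venn_diagram(e1: FrozenSet[A], e2: FrozenSet[A]) -> Tuple[Set[A], Set[A], Set[A]]:
-- 	l: Set[A] = set()
-- 	common: Set[A] = set()
-- 	r: Set[A] = set()
--
-- 	for x in e1:
-- 		if x in e2:
-- 			common.add(x)
-- 		else:
-- 			l.add(x)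
--
-- 	for x in e2:
-- 		if x in e1:
-- 			common.add(x)
-- 		else:
-- 			r.add(x)
--
-- 	return l, common, r
-- ===== SOURCE B (Python) =====
-- def venn_diagram(e1, e2):
--     # Single tagging dict: 1 = only e1, 2 = only e2, 3 = both; then partition by tag.
--     tag = {}
--     for x in e1:
--         tag[x] = 1
--     for x in e2:
--         tag[x] = 2 if tag.get(x, 2) == 2 else 3
--     l = {x for x, t in tag.items() if t == 1}
--     common = {x for x, t in tag.items() if t == 3}
--     r = {x for x, t in tag.items() if t == 2}
--     return l, common, r
-- ===== Notes on version B (the rewrite author's own statement) =====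
-- stated objective: alternative
-- what changed: Instead of two passes each testing membership in the other set, B builds one insertion-ordered tagging dict (1 = only e1, 2 = only e2, 3 = both) over both inputs and then partitions its items by tag.
import Mathlib
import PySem

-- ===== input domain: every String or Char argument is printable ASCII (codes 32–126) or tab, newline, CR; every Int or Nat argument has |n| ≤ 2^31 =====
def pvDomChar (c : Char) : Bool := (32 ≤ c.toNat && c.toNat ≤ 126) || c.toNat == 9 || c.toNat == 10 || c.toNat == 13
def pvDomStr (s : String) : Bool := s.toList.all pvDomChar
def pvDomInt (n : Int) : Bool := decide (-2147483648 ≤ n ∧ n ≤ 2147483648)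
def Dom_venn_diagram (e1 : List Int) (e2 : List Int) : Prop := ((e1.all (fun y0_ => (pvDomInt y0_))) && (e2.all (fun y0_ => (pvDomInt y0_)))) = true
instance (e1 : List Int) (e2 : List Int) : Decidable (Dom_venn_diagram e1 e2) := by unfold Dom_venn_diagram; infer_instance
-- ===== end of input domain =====

-- B replaces A's two membership-testing passes by one insertion-ordered tagging dict (1 = only e1, 2 = only e2, 3 = both) partitioned by tag; return-value equivalence is proved for all inputs.


-- ===== PORT A =====
-- Transliteration of A: one pass over e1 filling (l, common), then one pass over e2 filling (common, r).
def venn_diagram (e1 : List Int) (e2 : List Int) : List Int × List Int × List Int :=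
  let p1 := e1.foldl (fun (p : List Int × List Int) x =>
      if PySem.Set.contains e2 x then (p.1, PySem.Set.add p.2 x) else (PySem.Set.add p.1 x, p.2))
    (PySem.Set.empty, PySem.Set.empty)
  let p2 := e2.foldl (fun (p : List Int × List Int) x =>
      if PySem.Set.contains e1 x then (PySem.Set.add p.1 x, p.2) else (p.1, PySem.Set.add p.2 x))
    (p1.2, PySem.Set.empty)
  (p1.1, p2.1, p2.2)

-- ===== PORT B =====
-- Transliteration of B: tag = {}; for x in e1: tag[x] = 1; for x in e2: tag[x] = 2 if tag.get(x, 2) == 2 else 3;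
-- then the three set comprehensions over tag.items() selecting tags 1, 3, 2.
def venn_diagram_alt (e1 : List Int) (e2 : List Int) : List Int × List Int × List Int :=
  let tag1 := e1.foldl (fun d x => d.insert x (1 : Int)) PySem.Dict.empty
  let tag := e2.foldl (fun d x => d.insert x (if d.getD x 2 == 2 then (2 : Int) else 3)) tag1
  (PySem.Set.ofList ((tag.items.filter (fun p => p.2 == 1)).map (·.1)),
   PySem.Set.ofList ((tag.items.filter (fun p => p.2 == 3)).map (·.1)),
   PySem.Set.ofList ((tag.items.filter (fun p => p.2 == 2)).map (·.1)))

-- ===== PRECONDITION & SPEC =====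
def Spec_venn_diagram (e1 : List Int) (e2 : List Int) (out : List Int × List Int × List Int) : Prop := out = venn_diagram_alt e1 e2
instance (e1 : List Int) (e2 : List Int) (out : List Int × List Int × List Int) : Decidable (Spec_venn_diagram e1 e2 out) := by unfold Spec_venn_diagram; infer_instance

-- ===== CLAIM (what is proved, stated in full; the proofs are below) =====
def Claim_equal_venn_diagram : Prop := ∀ (e1 : List Int) (e2 : List Int), Dom_venn_diagram e1 e2 → Spec_venn_diagram e1 e2 (venn_diagram e1 e2)

-- ===== LEMMAS AND PROOFS =====

-- ---- A-side: A's two passes compute (diff, inter, diff) of the deduplicated inputs ----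

-- A's single pass over a list with a pair state splits into two independent conditional-add folds.
theorem pv_fold_pair (c : Int → Bool) (l : List Int) (a b : List Int) :
    l.foldl (fun (p : List Int × List Int) x =>
      if c x then (p.1, PySem.Set.add p.2 x) else (PySem.Set.add p.1 x, p.2)) (a, b)
    = (l.foldl (fun s x => if c x then s else PySem.Set.add s x) a,
       l.foldl (fun s x => if c x then PySem.Set.add s x else s) b) := by
  induction l generalizing a b with
  | nil => rfl
  | cons y t ih =>
      simp only [List.foldl_cons]
      by_cases h : c y = true <;> simp [h, ih]

-- filter commutes with Set.add.
theorem pv_filter_add (c : Int → Bool) (s : List Int) (x : Int) :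
    List.filter c (PySem.Set.add s x)
      = if c x then PySem.Set.add (List.filter c s) x else List.filter c s := by
  by_cases hc : c x = true <;>
    by_cases hm : x ∈ s <;>
      simp [PySem.Set.add, PySem.Set.contains, List.filter_append, hc, hm, List.mem_filter]

-- a conditional-add fold is the filter of the plain Set.add fold.
theorem pv_fold_filter (c : Int → Bool) (l : List Int) (s : List Int) :
    l.foldl (fun t x => if c x then PySem.Set.add t x else t) (List.filter c s)
      = List.filter c (l.foldl PySem.Set.add s) := by
  induction l generalizing s with
  | nil => rfl
  | cons y t ih =>
      simp only [List.foldl_cons]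
      have hfa := (pv_filter_add c s y).symm
      by_cases h : c y = true
      · rw [if_pos h] at hfa ⊢
        rw [hfa]
        exact ih _
      · rw [if_neg h] at hfa ⊢
        rw [hfa]
        exact ih _

-- flipping the branches of a conditional-add fold through Bool negation.
theorem pv_fold_flip (c : Int → Bool) (l : List Int) (a : List Int) :
    l.foldl (fun s x => if c x then s else PySem.Set.add s x) a
      = l.foldl (fun s x => if (!c x) then PySem.Set.add s x else s) a := by
  induction l generalizing a with
  | nil => rfl
  | cons y t ih =>
      simp only [List.foldl_cons]
      by_cases h : c y = true <;> simp only [h] <;> simp [ih]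

-- a conditional-add fold whose guarded elements are all already present is a no-op.
theorem pv_fold_noop (c : Int → Bool) (l : List Int) (s : List Int)
    (h : ∀ x ∈ l, c x = true → x ∈ s) :
    l.foldl (fun t x => if c x then PySem.Set.add t x else t) s = s := by
  induction l generalizing s with
  | nil => rfl
  | cons y t ih =>
      simp only [List.foldl_cons]
      by_cases hc : c y = true
      · have hy : y ∈ s := h y (List.mem_cons_self ..) hc
        have hadd : PySem.Set.add s y = s := by simp [PySem.Set.add, hy]
        rw [if_pos hc, hadd]
        exact ih s (fun x hx hcx => h x (List.mem_cons_of_mem _ hx) hcx)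
      · rw [if_neg hc]
        exact ih s (fun x hx hcx => h x (List.mem_cons_of_mem _ hx) hcx)

-- the mirrored pair fold (add to the FIRST component in the then-branch).
theorem pv_fold_pair2 (c : Int → Bool) (l : List Int) (a b : List Int) :
    l.foldl (fun (p : List Int × List Int) x =>
      if c x then (PySem.Set.add p.1 x, p.2) else (p.1, PySem.Set.add p.2 x)) (a, b)
    = (l.foldl (fun s x => if c x then PySem.Set.add s x else s) a,
       l.foldl (fun s x => if c x then s else PySem.Set.add s x) b) := by
  induction l generalizing a b with
  | nil => rfl
  | cons y t ih =>
      simp only [List.foldl_cons]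
      by_cases h : c y = true <;> simp [h, ih]

theorem pv_not_contains_ofList (l : List Int) :
    (fun x => !PySem.Set.contains l x) = (fun x => !(PySem.Set.ofList l).contains x) := by
  funext x
  simp [PySem.Set.contains, PySem.Set.mem_ofList]

theorem pv_contains_ofList (l : List Int) :
    PySem.Set.contains l = (PySem.Set.ofList l).contains := by
  funext x
  simp [PySem.Set.contains, PySem.Set.mem_ofList]

-- A's result, in closed form.
theorem pv_A_closed (e1 e2 : List Int) :
    venn_diagram e1 e2
      = (PySem.Set.diff (PySem.Set.ofList e1) (PySem.Set.ofList e2),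
         PySem.Set.inter (PySem.Set.ofList e1) (PySem.Set.ofList e2),
         PySem.Set.diff (PySem.Set.ofList e2) (PySem.Set.ofList e1)) := by
  simp only [venn_diagram]
  rw [pv_fold_pair, pv_fold_pair2]
  simp only []
  have key : ∀ (l m : List Int),
      l.foldl (fun s x => if PySem.Set.contains m x then s else PySem.Set.add s x)
        PySem.Set.empty
      = PySem.Set.diff (PySem.Set.ofList l) (PySem.Set.ofList m) := by
    intro l m
    have hff := pv_fold_filter (fun x => !PySem.Set.contains m x) l []
    simp only [List.filter_nil] at hff
    rw [show PySem.Set.empty = ([] : List Int) from rfl, pv_fold_flip, hff,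
      pv_not_contains_ofList, PySem.Set.ofList_eq_foldl]
    rfl
  have hc : e1.foldl (fun s x => if PySem.Set.contains e2 x then PySem.Set.add s x else s)
        PySem.Set.empty
      = PySem.Set.inter (PySem.Set.ofList e1) (PySem.Set.ofList e2) := by
    have hff := pv_fold_filter (fun x => PySem.Set.contains e2 x) e1 []
    simp only [List.filter_nil] at hff
    calc e1.foldl (fun s x => if PySem.Set.contains e2 x then PySem.Set.add s x else s)
          PySem.Set.empty
        = List.filter (fun x => PySem.Set.contains e2 x) (e1.foldl PySem.Set.add []) := hff
      _ = _ := by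
          rw [show (fun x => PySem.Set.contains e2 x) = (PySem.Set.ofList e2).contains from
              pv_contains_ofList e2, PySem.Set.ofList_eq_foldl]
          rfl
  have hnoop : e2.foldl (fun s x => if PySem.Set.contains e1 x then PySem.Set.add s x else s)
        (PySem.Set.inter (PySem.Set.ofList e1) (PySem.Set.ofList e2))
      = PySem.Set.inter (PySem.Set.ofList e1) (PySem.Set.ofList e2) := by
    apply pv_fold_noop
    intro x hx hcx
    simp only [PySem.Set.contains, List.contains_iff_mem] at hcx
    simp [PySem.Set.inter, List.mem_filter, PySem.Set.mem_ofList, hcx, hx,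
      PySem.Set.contains]
  rw [key e1 e2, hc, hnoop, key e2 e1]

-- ---- B-side ----

-- dedup commutes with filter.
theorem pv_ofList_filter (p : Int → Bool) (l : List Int) :
    PySem.Set.ofList (l.filter p) = (PySem.Set.ofList l).filter p := by
  induction l using List.reverseRecOn with
  | nil => rfl
  | append_singleton t a ih =>
      rw [List.filter_append, PySem.Set.ofList_append_singleton]
      by_cases ha : p a = true
      · simp only [List.filter_cons, ha, List.filter_nil, if_true]
        rw [PySem.Set.ofList_append_singleton, ih, PySem.Set.add_eq_ite, PySem.Set.add_eq_ite]
        by_cases hm : a ∈ PySem.Set.ofList t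
        · simp [hm, List.mem_filter, ha]
        · simp [hm, List.mem_filter, List.filter_append, ha]
      · have ha' : p a = false := by simpa using ha
        simp only [List.filter_cons, ha', List.filter_nil, Bool.false_eq_true, if_false]
        rw [List.append_nil, ih, PySem.Set.add_eq_ite]
        by_cases hm : a ∈ PySem.Set.ofList t
        · simp [hm]
        · simp [hm, List.filter_append, ha']

-- items of a literal dict.
theorem pv_items_mk (l : List (Int × Int)) : (PySem.Dict.mk l).items = l := rfl

-- the e1 pass: inserting value 1 for every element builds the dedup paired with 1.
theorem pvB_fold1 (l : List Int) (s : List Int) :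
    (l.foldl (fun d x => d.insert x (1 : Int))
        (PySem.Dict.mk (s.map (fun k => (k, (1 : Int)))))).items
      = (PySem.Set.update s l).map (fun k => (k, (1 : Int))) := by
  induction l generalizing s with
  | nil => simp [PySem.Set.update]
  | cons x t ih =>
      simp only [List.foldl_cons]
      have hkeys : (PySem.Dict.mk (s.map (fun k => (k, (1 : Int))))).keys = s := by
        simp [PySem.Dict.keys, Function.comp_def]
      by_cases hm : x ∈ s
      · have hco : (PySem.Dict.mk (s.map (fun k => (k, (1 : Int))))).contains x = true := by
          rw [PySem.Dict.contains_eq_decide_mem_keys, hkeys]; simpa using hm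
        have hins : (PySem.Dict.mk (s.map (fun k => (k, (1 : Int))))).insert x 1
            = PySem.Dict.mk (s.map (fun k => (k, (1 : Int)))) := by
          apply PySem.Dict.ext
          rw [PySem.Dict.items_insert_of_contains _ _ hco]
          rw [pv_items_mk, List.map_map]
          apply List.map_congr_left
          intro k _
          by_cases hk : k = x <;> simp [hk]
        rw [hins, ih, PySem.Set.update_cons, PySem.Set.add_of_mem hm]
      · have hco : (PySem.Dict.mk (s.map (fun k => (k, (1 : Int))))).contains x = false := by
          rw [PySem.Dict.contains_eq_decide_mem_keys, hkeys]; simpa using hm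
        have hins : (PySem.Dict.mk (s.map (fun k => (k, (1 : Int))))).insert x 1
            = PySem.Dict.mk ((s ++ [x]).map (fun k => (k, (1 : Int)))) := by
          apply PySem.Dict.ext
          rw [PySem.Dict.items_insert_of_not_contains _ _ hco]
          simp
        rw [hins, ih, PySem.Set.update_cons, PySem.Set.add_of_not_mem hm]

-- the e2 pass: invariant over the tagging dict.
theorem pvB_fold2 (e1 : List Int) (l : List Int) (f : Int → Bool) (r : List Int)
    (hr : r.Nodup) (hre : ∀ x ∈ r, x ∉ e1) :
    (l.foldl (fun d x => d.insert x (if d.getD x 2 == 2 then (2 : Int) else 3))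
        (PySem.Dict.mk
          ((PySem.Set.ofList e1).map (fun k => (k, if f k then (3 : Int) else 1))
            ++ r.map (fun k => (k, (2 : Int)))))).items
      = (PySem.Set.ofList e1).map
          (fun k => (k, if f k || l.contains k then (3 : Int) else 1))
        ++ (PySem.Set.update r (l.filter (fun x => !e1.contains x))).map
            (fun k => (k, (2 : Int))) := by
  induction l generalizing f r with
  | nil => simp [PySem.Set.update]
  | cons x t ih =>
      simp only [List.foldl_cons]
      set d := PySem.Dict.mk
          ((PySem.Set.ofList e1).map (fun k => (k, if f k then (3 : Int) else 1))
            ++ r.map (fun k => (k, (2 : Int)))) with hd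
      have hkeys : d.keys = PySem.Set.ofList e1 ++ r := by
        simp [hd, PySem.Dict.keys, Function.comp_def]
      have hnodup : d.keys.Nodup := by
        rw [hkeys]
        refine List.Nodup.append (PySem.Set.nodup_ofList e1) hr ?_
        intro a ha hb
        exact hre a hb (by simpa [PySem.Set.mem_ofList] using ha)
      by_cases h1 : x ∈ e1
      · -- x is an e1 key: value ≠ 2, insert x 3 in place
        have hmem : (x, if f x then (3 : Int) else 1) ∈ d.items := by
          simp only [hd]
          exact List.mem_append_left _
            (List.mem_map.2 ⟨x, by simpa [PySem.Set.mem_ofList] using h1, rfl⟩)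
        have hget : d.getD x 2 = if f x then (3 : Int) else 1 :=
          PySem.Dict.getD_of_mem_items _ hmem hnodup 2
        have hval : (if d.getD x 2 == 2 then (2 : Int) else 3) = 3 := by
          rw [hget]; by_cases hf : f x = true <;> simp [hf]
        have hco : d.contains x = true := by
          rw [PySem.Dict.contains_eq_decide_mem_keys, hkeys]
          simp [PySem.Set.mem_ofList, h1]
        have hins : d.insert x (if d.getD x 2 == 2 then (2 : Int) else 3)
            = PySem.Dict.mk
              ((PySem.Set.ofList e1).map (fun k => (k, if f k || k == x then (3 : Int) else 1))
                ++ r.map (fun k => (k, (2 : Int)))) := by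
          apply PySem.Dict.ext
          rw [hval, PySem.Dict.items_insert_of_contains _ _ hco]
          rw [hd, pv_items_mk, List.map_append, List.map_map, List.map_map]
          congr 1
          · apply List.map_congr_left
            intro k _
            by_cases hk : k = x <;> simp [hk]
          · apply List.map_congr_left
            intro k hk
            have : k ≠ x := fun he => hre k hk (he ▸ h1)
            simp [this]
        rw [hins, ih _ _ hr hre]
        have hfilt : (x :: t).filter (fun y => !e1.contains y) = t.filter (fun y => !e1.contains y) := by
          simp [h1]
        rw [hfilt]
        congr 1
        apply List.map_congr_left
        intro k _
        by_cases hk : k = x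
        · subst hk; simp
        · simp [hk, Bool.or_assoc]
      · by_cases h2 : x ∈ r
        · -- x already an e2-only key: value 2, re-insert 2 in place: dict unchanged
          have hmem : (x, (2 : Int)) ∈ d.items := by
            simp only [hd]
            exact List.mem_append_right _ (List.mem_map.2 ⟨x, h2, rfl⟩)
          have hget : d.getD x 2 = 2 := PySem.Dict.getD_of_mem_items _ hmem hnodup 2
          have hco : d.contains x = true := by
            rw [PySem.Dict.contains_eq_decide_mem_keys, hkeys]
            simp [h2]
          have hins : d.insert x (if d.getD x 2 == 2 then (2 : Int) else 3) = d := by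
            apply PySem.Dict.ext
            rw [hget]
            simp only [beq_self_eq_true, if_true]
            rw [PySem.Dict.items_insert_of_contains _ _ hco, hd, pv_items_mk,
              List.map_append, List.map_map, List.map_map]
            congr 1
            · apply List.map_congr_left
              intro k hk
              have : k ≠ x := fun he => h1 (he ▸ by simpa [PySem.Set.mem_ofList] using hk)
              simp [this]
            · apply List.map_congr_left
              intro k _
              by_cases hk : k = x <;> simp [hk]
          rw [hins, hd, ih _ _ hr hre]
          have hfilt : (x :: t).filter (fun y => !e1.contains y)
              = x :: t.filter (fun y => !e1.contains y) := by
            simp [h1]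
          rw [hfilt, PySem.Set.update_cons, PySem.Set.add_of_mem h2]
          congr 1
          apply List.map_congr_left
          intro k hk
          have : k ≠ x := fun he => h1 (he ▸ by simpa [PySem.Set.mem_ofList] using hk)
          simp [this]
        · -- x fresh: value 2, append
          have hco : d.contains x = false := by
            rw [PySem.Dict.contains_eq_decide_mem_keys, hkeys]
            simp [PySem.Set.mem_ofList, h1, h2]
          have hget : d.getD x 2 = 2 := PySem.Dict.getD_of_not_contains _ 2 hco
          have hins : d.insert x (if d.getD x 2 == 2 then (2 : Int) else 3)
              = PySem.Dict.mk
                ((PySem.Set.ofList e1).map (fun k => (k, if f k then (3 : Int) else 1))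
                  ++ (r ++ [x]).map (fun k => (k, (2 : Int)))) := by
            apply PySem.Dict.ext
            rw [hget]
            simp only [beq_self_eq_true, if_true]
            rw [PySem.Dict.items_insert_of_not_contains _ _ hco]
            simp [hd]
          have hr' : (r ++ [x]).Nodup := by
            refine List.Nodup.append hr (List.nodup_singleton x) ?_
            intro a ha hb
            rw [List.mem_singleton] at hb
            exact h2 (hb ▸ ha)
          have hre' : ∀ y ∈ r ++ [x], y ∉ e1 := by
            intro y hy
            rcases List.mem_append.1 hy with hy | hy
            · exact hre y hy
            · simp at hy; subst hy; exact h1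
          rw [hins, ih _ _ hr' hre']
          have hfilt : (x :: t).filter (fun y => !e1.contains y)
              = x :: t.filter (fun y => !e1.contains y) := by
            simp [h1]
          rw [hfilt, PySem.Set.update_cons, PySem.Set.add_of_not_mem h2]
          congr 1
          apply List.map_congr_left
          intro k hk
          have : k ≠ x := fun he => h1 (he ▸ by simpa [PySem.Set.mem_ofList] using hk)
          simp [this]

-- projecting the keys of a tagged map filtered by tag value.
theorem pv_proj_filter (s : List Int) (g : Int → Int) (v : Int) :
    (((s.map (fun k => (k, g k))).filter (fun p => p.2 == v)).map (·.1))
      = s.filter (fun k => g k == v) := by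
  induction s with
  | nil => rfl
  | cons a t ih =>
      by_cases h : (g a == v) = true <;>
        simp [List.filter_cons, h, ih]

-- Set.contains of a dedup is List.contains of the original.
theorem pv_contains_ofList_eq (m : List Int) (x : Int) :
    PySem.Set.contains (PySem.Set.ofList m) x = m.contains x := by
  by_cases h : x ∈ m
  · have h1 : PySem.Set.contains (PySem.Set.ofList m) x = true := by
      rw [PySem.Set.contains_iff]; exact (PySem.Set.mem_ofList _ _).2 h
    have h2 : m.contains x = true := by simpa [List.contains_iff_mem] using h
    rw [h1, h2]
  · have h1 : PySem.Set.contains (PySem.Set.ofList m) x = false := by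
      rw [Bool.eq_false_iff]
      intro hc
      exact h ((PySem.Set.mem_ofList _ _).1 ((PySem.Set.contains_iff _ _).1 hc))
    have h2 : m.contains x = false := by
      rw [Bool.eq_false_iff]
      intro hc
      exact h (by simpa [List.contains_iff_mem] using hc)
    rw [h1, h2]

-- B's result, in closed form.
theorem pv_B_closed (e1 e2 : List Int) :
    venn_diagram_alt e1 e2
      = (PySem.Set.diff (PySem.Set.ofList e1) (PySem.Set.ofList e2),
         PySem.Set.inter (PySem.Set.ofList e1) (PySem.Set.ofList e2),
         PySem.Set.diff (PySem.Set.ofList e2) (PySem.Set.ofList e1)) := by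
  simp only [venn_diagram_alt]
  have h1 : e1.foldl (fun d x => d.insert x (1 : Int)) PySem.Dict.empty
      = PySem.Dict.mk ((PySem.Set.ofList e1).map (fun k => (k, (1 : Int)))) := by
    apply PySem.Dict.ext
    have hb := pvB_fold1 e1 []
    simp only [List.map_nil] at hb
    rw [show PySem.Dict.empty = PySem.Dict.mk ([] : List (Int × Int)) from rfl]
    rw [hb, pv_items_mk, PySem.Set.update_nil_left]
  rw [h1]
  have h2 := pvB_fold2 e1 e2 (fun _ => false) [] List.nodup_nil (by simp)
  simp only [Bool.false_eq_true, if_false, Bool.false_or, List.map_nil, List.append_nil,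
    PySem.Set.update_nil_left] at h2
  rw [h2, pv_ofList_filter]
  have hproj : ∀ v : Int,
      ((((PySem.Set.ofList e1).map (fun k => (k, if e2.contains k then (3 : Int) else 1))
          ++ ((PySem.Set.ofList e2).filter (fun x => !e1.contains x)).map
              (fun k => (k, (2 : Int)))).filter (fun p => p.2 == v)).map (·.1))
        = (PySem.Set.ofList e1).filter (fun k => (if e2.contains k then (3 : Int) else 1) == v)
          ++ ((PySem.Set.ofList e2).filter (fun x => !e1.contains x)).filter
              (fun k => ((2 : Int) == v)) := by
    intro v
    rw [List.filter_append, List.map_append,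
      pv_proj_filter _ (fun k => if e2.contains k then (3 : Int) else 1) v,
      pv_proj_filter _ (fun _ => (2 : Int)) v]
  have hd12 : PySem.Set.diff (PySem.Set.ofList e1) (PySem.Set.ofList e2)
      = (PySem.Set.ofList e1).filter (fun k => !e2.contains k) := by
    show (PySem.Set.ofList e1).filter (fun k => !PySem.Set.contains (PySem.Set.ofList e2) k) = _
    apply List.filter_congr
    intro k _
    rw [pv_contains_ofList_eq]
  have hd21 : PySem.Set.diff (PySem.Set.ofList e2) (PySem.Set.ofList e1)
      = (PySem.Set.ofList e2).filter (fun k => !e1.contains k) := by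
    show (PySem.Set.ofList e2).filter (fun k => !PySem.Set.contains (PySem.Set.ofList e1) k) = _
    apply List.filter_congr
    intro k _
    rw [pv_contains_ofList_eq]
  have hi : PySem.Set.inter (PySem.Set.ofList e1) (PySem.Set.ofList e2)
      = (PySem.Set.ofList e1).filter (fun k => e2.contains k) := by
    show (PySem.Set.ofList e1).filter (fun k => PySem.Set.contains (PySem.Set.ofList e2) k) = _
    apply List.filter_congr
    intro k _
    rw [pv_contains_ofList_eq]
  refine Prod.ext ?_ (Prod.ext ?_ ?_)
  · -- tag 1: only-e1
    show PySem.Set.ofList _ = _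
    rw [hproj 1]
    have e2nil : ((PySem.Set.ofList e2).filter (fun x => !e1.contains x)).filter
        (fun k => ((2 : Int) == 1)) = [] := by simp
    have e1part : (PySem.Set.ofList e1).filter
          (fun k => (if e2.contains k then (3 : Int) else 1) == 1)
        = (PySem.Set.ofList e1).filter (fun k => !e2.contains k) := by
      apply List.filter_congr
      intro k _
      cases h : e2.contains k <;> simp
    rw [e2nil, e1part, List.append_nil, hd12]
    exact PySem.Set.ofList_eq_self_of_nodup _ (List.Nodup.filter _ (PySem.Set.nodup_ofList e1))
  · -- tag 3: common
    show PySem.Set.ofList _ = _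
    rw [hproj 3]
    have e2nil : ((PySem.Set.ofList e2).filter (fun x => !e1.contains x)).filter
        (fun k => ((2 : Int) == 3)) = [] := by simp
    have e1part : (PySem.Set.ofList e1).filter
          (fun k => (if e2.contains k then (3 : Int) else 1) == 3)
        = (PySem.Set.ofList e1).filter (fun k => e2.contains k) := by
      apply List.filter_congr
      intro k _
      cases h : e2.contains k <;> simp
    rw [e2nil, e1part, List.append_nil, hi]
    exact PySem.Set.ofList_eq_self_of_nodup _ (List.Nodup.filter _ (PySem.Set.nodup_ofList e1))
  · -- tag 2: only-e2
    show PySem.Set.ofList _ = _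
    rw [hproj 2]
    have e1nil : (PySem.Set.ofList e1).filter
        (fun k => (if e2.contains k then (3 : Int) else 1) == 2) = [] := by
      apply List.filter_eq_nil_iff.2
      intro k _
      cases h : e2.contains k <;> simp
    rw [e1nil, List.nil_append]
    have : ((PySem.Set.ofList e2).filter (fun x => !e1.contains x)).filter
        (fun k => ((2 : Int) == 2)) = (PySem.Set.ofList e2).filter (fun x => !e1.contains x) := by
      simp
    rw [this, hd21]
    exact PySem.Set.ofList_eq_self_of_nodup _ (List.Nodup.filter _ (PySem.Set.nodup_ofList e2))

-- ===== VERDICT (by name: the statement is the Claim_ definition above) =====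
theorem venn_diagram_spec : Claim_equal_venn_diagram := by
  intro e1 e2 _
  show venn_diagram e1 e2 = venn_diagram_alt e1 e2
  rw [pv_A_closed, pv_B_closed]
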